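-- pv_equiv track=rewrite | github.com/Valentin-Guillet/AISHackingChallenges | steganography_25.py | count_periods
-- ===== SOURCE A (Python) =====
-- def count_periods(data):
--     is_positive = False
--     count = 0
--     for x in data:
--         if not is_positive and x > 0:
--             is_positive = True
--             count += 1
--         elif is_positive and x < 0:
--             is_positive = False
--     return count
-- ===== SOURCE B (Python) =====
-- from itertools import groupby
--
-- def count_periods(data):
--     signs = (x > 0 for x in data if x > 0 or x < 0)
--     return sum(1 for k, _ in groupby(signs) if k)
-- ===== Notes on version B (the rewrite author's own statement) =====
-- stated objective: idiomatic
-- what changed: Replaces the hand-rolled state machine with filter-then-group: drop zeros, take the signs, and count the maximal runs of positives with itertools.groupby.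
import Mathlib
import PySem

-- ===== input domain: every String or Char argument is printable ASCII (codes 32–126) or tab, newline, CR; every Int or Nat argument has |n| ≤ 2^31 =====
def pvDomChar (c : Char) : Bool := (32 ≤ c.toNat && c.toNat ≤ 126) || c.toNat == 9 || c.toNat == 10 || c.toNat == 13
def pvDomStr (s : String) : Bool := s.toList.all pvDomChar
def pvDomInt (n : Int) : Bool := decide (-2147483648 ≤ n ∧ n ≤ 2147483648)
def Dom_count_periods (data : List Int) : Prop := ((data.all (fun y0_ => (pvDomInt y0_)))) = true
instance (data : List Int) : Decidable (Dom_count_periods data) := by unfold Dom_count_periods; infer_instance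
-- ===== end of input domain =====

-- ===== PORT A =====
-- Hand-rolled state machine: literal transliteration of A's loop body over (is_positive, count).
def pvStep (s : Bool × Int) (x : Int) : Bool × Int :=
  if !s.1 && decide (x > 0) then (true, s.2 + 1)
  else if s.1 && decide (x < 0) then (false, s.2)
  else s

def count_periods (data : List Int) : Int :=
  (data.foldl pvStep (false, 0)).2

-- ===== PORT B =====
-- groupby keys: first element of each maximal run of equal booleans (itertools.groupby).
def pvGroups : List Bool → List Bool
  | [] => []
  | b :: t => b :: pvGroups (t.dropWhile (· == b))
termination_by l => l.length
decreasing_by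
  simp only [List.length_cons]
  have := List.length_dropWhile_le (· == b) t
  omega

-- B: filter out zeros, map to sign booleans, count groups whose key is true.
def count_periods_alt (data : List Int) : Int :=
  let signs := (data.filter (fun x => decide (x > 0) || decide (x < 0))).map (fun x => decide (x > 0))
  (((pvGroups signs).count true : Nat) : Int)

-- ===== PRECONDITION & SPEC =====
def Spec_count_periods (data : List Int) (out : Int) : Prop := out = count_periods_alt data
instance (data : List Int) (out : Int) : Decidable (Spec_count_periods data out) := by unfold Spec_count_periods; infer_instance

-- ===== CLAIM =====
def Claim_equal_count_periods : Prop := ∀ (data : List Int), Dom_count_periods data → Spec_count_periods data (count_periods data)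

-- ===== LEMMAS AND PROOFS =====

-- A's loop as a structural recursion on the data (count contribution from state p).
def pvG : Bool → List Int → Int
  | _, [] => 0
  | p, x :: t =>
    if !p && decide (x > 0) then 1 + pvG true t
    else if p && decide (x < 0) then pvG false t
    else pvG p t

-- rising-edge counter on the boolean sign stream
def pvE : Bool → List Bool → Nat
  | _, [] => 0
  | p, b :: t => (if b && !p then 1 else 0) + pvE b t

def pvSigns (data : List Int) : List Bool :=
  (data.filter (fun x => decide (x > 0) || decide (x < 0))).map (fun x => decide (x > 0))

theorem pvStep_eq (p : Bool) (c : Int) (x : Int) :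
    pvStep (p, c) x = if !p && decide (x > 0) then (true, c + 1)
      else if p && decide (x < 0) then (false, c) else (p, c) := rfl

theorem pvFoldA (data : List Int) : ∀ (p : Bool) (c : Int),
    (data.foldl pvStep (p, c)).2 = c + pvG p data := by
  induction data with
  | nil => intro p c; simp [pvG]
  | cons x t ih =>
    intro p c
    rw [List.foldl_cons, pvStep_eq]
    simp only [pvG]
    split_ifs with h1 h2 <;> rw [ih] <;> ring

theorem pvG_eq_E (data : List Int) : ∀ p : Bool, pvG p data = ((pvE p (pvSigns data) : Nat) : Int) := by
  induction data with
  | nil => intro p; simp [pvG, pvE, pvSigns]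
  | cons x t ih =>
    intro p
    rcases lt_trichotomy x 0 with hx | hx | hx
    · have h1 : ¬ (0 : Int) < x := by omega
      have hs : pvSigns (x :: t) = false :: pvSigns t := by
        simp [pvSigns, hx, h1]
      cases p <;> simp [pvG, hs, pvE, hx, h1, ih]
    · subst hx
      have hs : pvSigns ((0:Int) :: t) = pvSigns t := by
        simp [pvSigns]
      cases p <;> simp [pvG, hs, ih]
    · have h1 : ¬ x < (0 : Int) := by omega
      have hs : pvSigns (x :: t) = true :: pvSigns t := by
        simp [pvSigns, hx, h1]
      cases p <;> simp [pvG, hs, pvE, hx, h1, ih]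

theorem pvE_dropWhile (t : List Bool) (b : Bool) :
    pvE b (t.dropWhile (· == b)) = pvE b t := by
  induction t with
  | nil => rfl
  | cons h r ih =>
    by_cases hb : h = b
    · subst hb; simpa [pvE] using ih
    · simp [List.dropWhile_cons, hb]

theorem pvE_swap (t : List Bool) :
    pvE true (t.dropWhile (· == true)) = pvE false (t.dropWhile (· == true)) := by
  induction t with
  | nil => rfl
  | cons h r ih =>
    cases h
    · simp [List.dropWhile_cons, pvE]
    · simpa [List.dropWhile_cons] using ih

theorem pvE_cons (p b : Bool) (t : List Bool) :
    pvE p (b :: t) = (if b && !p then 1 else 0) + pvE b t := rfl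

theorem pvE_count (bs : List Bool) : pvE false bs = (pvGroups bs).count true := by
  induction bs using pvGroups.induct with
  | case1 => simp [pvGroups, pvE]
  | case2 b t ih =>
    rw [pvGroups, pvE_cons, ← pvE_dropWhile t b]
    cases b
    · rw [ih]
      simp [List.count_cons]
    · rw [pvE_swap t, ih]
      simp only [List.count_cons]
      simp
      omega

-- ===== VERDICT =====
theorem count_periods_spec : Claim_equal_count_periods := by
  intro data _
  unfold Spec_count_periods count_periods count_periods_alt
  rw [pvFoldA data false 0, pvG_eq_E data false, pvE_count]
  simp [pvSigns]
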